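-- pv_equiv track=rewrite | github.com/Gramandrei/FP-laborator-AN1 | L2 Tema Fp 24.10.23/Tema exercitiul 6.py | d_vect
-- ===== SOURCE A (Python) =====
-- def domino(nr1, nr2):
--
--     if nr1 % 10 == (nr2 // 10) % 10:
--         return True
--
--     return False
--
-- def d_vect(vect):
--     lg = 1
--     l_max = 1
--
--     for i in range(len(vect) - 1):
--
--         if domino(vect[i], vect[i + 1]) == True:
--             lg += 1
--
--         else:
--             lg = 1
--
--         if lg > l_max:
--             l_max = lg
--
--     return l_max
-- ===== SOURCE B (Python) =====
-- def domino(nr1, nr2):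
--
--     if nr1 % 10 == (nr2 // 10) % 10:
--         return True
--
--     return False
--
-- def d_vect(vect):
--     n = len(vect)
--     breaks = [i for i in range(n - 1) if not domino(vect[i], vect[i + 1])]
--     bounds = [-1] + breaks + [n - 1]
--     diffs = [b - a for a, b in zip(bounds, bounds[1:])]
--     return max(diffs + [1])
-- ===== Notes on version B (the rewrite author's own statement) =====
-- stated objective: alternative
-- what changed: A tracks the current run length and a running maximum in one accumulator loop; B instead materializes the indices of non-connecting adjacent pairs ('breaks'), forms the boundary list of -1, the breaks, and n-1, and returns the maximal difference of consecutive boundaries (at least 1).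
import Mathlib
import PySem

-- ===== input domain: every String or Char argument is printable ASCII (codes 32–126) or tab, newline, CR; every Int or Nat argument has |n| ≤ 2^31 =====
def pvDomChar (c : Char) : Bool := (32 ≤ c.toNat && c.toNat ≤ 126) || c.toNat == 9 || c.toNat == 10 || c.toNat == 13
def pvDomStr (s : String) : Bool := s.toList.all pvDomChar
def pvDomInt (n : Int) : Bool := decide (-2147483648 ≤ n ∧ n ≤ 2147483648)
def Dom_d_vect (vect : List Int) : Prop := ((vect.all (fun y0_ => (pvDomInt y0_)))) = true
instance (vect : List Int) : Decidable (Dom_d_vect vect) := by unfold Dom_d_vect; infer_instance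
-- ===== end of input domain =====

-- B replaces A's running-length/max accumulator loop by materializing the indices of
-- non-connecting adjacent pairs ("breaks") and taking the maximal gap between consecutive
-- boundaries (objective: alternative two-pass decomposition, same O(n) cost).

-- ===== PORT A =====
def dominoA (nr1 nr2 : Int) : Bool :=
  if PySem.Int.mod nr1 10 == PySem.Int.mod (PySem.Int.floordiv nr2 10) 10 then true
  else false

def d_vect (vect : List Int) : Int :=
  let r := (PySem.List.pyRange 0 ((vect.length : Int) - 1) 1).foldl
    (fun (s : Int × Int) (i : Int) =>
      let lg := if dominoA (PySem.List.pyGetD vect i 0) (PySem.List.pyGetD vect (i + 1) 0) == true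
                then s.1 + 1 else 1
      let l_max := if lg > s.2 then lg else s.2
      (lg, l_max)) (1, 1)
  r.2

-- ===== PORT B =====
def d_vect_alt (vect : List Int) : Int :=
  let n : Int := vect.length
  let breaks := (PySem.List.pyRange 0 (n - 1) 1).filter
    (fun i => !(dominoA (PySem.List.pyGetD vect i 0) (PySem.List.pyGetD vect (i + 1) 0)))
  let bounds := [-1] ++ breaks ++ [n - 1]
  let diffs := (List.zip bounds (PySem.List.slice bounds (some 1) none)).map (fun p => p.2 - p.1)
  -- max(diffs + [1]); the list is never empty, so max? is always some
  (PySem.List.max? (diffs ++ [1]) (fun y => y)).getD 0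

-- ===== PRECONDITION & SPEC =====
def Spec_d_vect (vect : List Int) (out : Int) : Prop := out = d_vect_alt vect
instance (vect : List Int) (out : Int) : Decidable (Spec_d_vect vect out) := by unfold Spec_d_vect; infer_instance

-- ===== CLAIM (what is proved, stated in full; the proofs are below) =====
def Claim_equal_d_vect : Prop := ∀ (vect : List Int), Dom_d_vect vect → Spec_d_vect vect (d_vect vect)

-- ===== LEMMAS AND PROOFS =====

-- the list of adjacent pairs of v
def pvPairs (v : List Int) : List (Int × Int) := List.zip v v.tail

-- the body of A's loop, named (definitionally equal to the lambda in the port)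
def pvBodyA (v : List Int) (s : Int × Int) (i : Int) : Int × Int :=
  let lg := if dominoA (PySem.List.pyGetD v i 0) (PySem.List.pyGetD v (i + 1) 0) == true
            then s.1 + 1 else 1
  let l_max := if lg > s.2 then lg else s.2
  (lg, l_max)

-- step function of A's loop, on a pair
def pvStep (s : Int × Int) (p : Int × Int) : Int × Int :=
  let lg := if dominoA p.1 p.2 == true then s.1 + 1 else 1
  let l_max := if lg > s.2 then lg else s.2
  (lg, l_max)

-- indices (starting at k) of the non-domino pairs
def pvBrk : List (Int × Int) → Int → List Int
  | [], _ => []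
  | p :: t, k => if !(dominoA p.1 p.2) then k :: pvBrk t (k + 1) else pvBrk t (k + 1)

-- maximal gap between consecutive members of prev :: bs ++ [last]
def pvGmax : Int → List Int → Int → Int
  | prev, [], last => last - prev
  | prev, x :: bs, last => max (x - prev) (pvGmax x bs last)

-- consecutive differences of prev :: l
def pvPd : Int → List Int → List Int
  | _, [] => []
  | prev, x :: l => (x - prev) :: pvPd x l

theorem pvBrk_mem (t : List (Int × Int)) (k : Int) (x : Int) (hx : x ∈ pvBrk t k) : k ≤ x := by
  induction t generalizing k with
  | nil => simp [pvBrk] at hx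
  | cons p u ih =>
    simp only [pvBrk] at hx
    split at hx
    · rcases List.mem_cons.1 hx with h | h
      · omega
      · have := ih (k + 1) h; omega
    · have := ih (k + 1) hx; omega

theorem pvGmax_ge (bs : List Int) (prev last c : Int)
    (hbs : ∀ x ∈ bs, c ≤ x) (hl : c ≤ last) :
    c - prev ≤ pvGmax prev bs last := by
  cases bs with
  | nil => simp only [pvGmax]; omega
  | cons x r =>
    have hx : c ≤ x := hbs x (List.mem_cons_self ..)
    simp only [pvGmax]
    have := le_max_left (x - prev) (pvGmax x r last)
    omega

theorem pvMain (t : List (Int × Int)) (k lg lm : Int) (h1 : 1 ≤ lg) (h2 : lg ≤ lm) :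
    (t.foldl pvStep (lg, lm)).2
      = max lm (max (pvGmax (k - lg) (pvBrk t k) (k + (t.length : Int))) 1) := by
  induction t generalizing k lg lm with
  | nil => simp only [List.foldl_nil, pvBrk, pvGmax, List.length_nil, Nat.cast_zero, add_zero]; omega
  | cons p u ih =>
    by_cases hd : dominoA p.1 p.2
    · -- connected: run grows
      have hstep : pvStep (lg, lm) p = (lg + 1, max lm (lg + 1)) := by
        simp only [pvStep, hd]
        simp
        omega
      have hbrk : pvBrk (p :: u) k = pvBrk u (k + 1) := by simp [pvBrk, hd]
      simp only [List.foldl_cons, hstep, hbrk]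
      rw [ih (k + 1) (lg + 1) (max lm (lg + 1)) (by omega) (by omega)]
      have hk : k + 1 - (lg + 1) = k - lg := by omega
      have hlen : (k + 1) + (u.length : Int) = k + (((p :: u).length : Nat) : Int) := by
        simp [List.length_cons]; omega
      rw [hk, hlen]
      have hge : lg + 1 ≤ pvGmax (k - lg) (pvBrk u (k + 1)) (k + (((p :: u).length : Nat) : Int)) := by
        have := pvGmax_ge (pvBrk u (k + 1)) (k - lg) (k + (((p :: u).length : Nat) : Int)) (k + 1)
          (fun x hx => pvBrk_mem u (k + 1) x hx)
          (by simp [List.length_cons])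
        omega
      omega
    · -- break at index k: run resets
      have hstep : pvStep (lg, lm) p = (1, lm) := by
        simp only [pvStep, hd]
        simp
        omega
      have hbrk : pvBrk (p :: u) k = k :: pvBrk u (k + 1) := by simp [pvBrk, hd]
      simp only [List.foldl_cons, hstep, hbrk]
      rw [ih (k + 1) 1 lm (by omega) (by omega)]
      have hlen : (k + 1) + (u.length : Int) = k + (((p :: u).length : Nat) : Int) := by
        simp [List.length_cons]; omega
      rw [hlen]
      have hk1 : k + 1 - (1 : Int) = k := by omega
      rw [hk1]
      simp only [pvGmax]
      omega

theorem pvFM (l : List Int) (a b : Int) : l.foldl max (max a b) = max a (l.foldl max b) := by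
  induction l generalizing b with
  | nil => simp
  | cons c l ih =>
    simp only [List.foldl_cons]
    rw [max_assoc, ih]

theorem pvPd_zip (l : List Int) (prev : Int) :
    (List.zip (prev :: l) l).map (fun p => p.2 - p.1) = pvPd prev l := by
  induction l generalizing prev with
  | nil => simp [pvPd]
  | cons x r ih => simp only [List.zip_cons_cons, List.map_cons, pvPd, ih]

theorem pvM5 (bs : List Int) (prev last : Int) :
    (PySem.List.max? (pvPd prev (bs ++ [last]) ++ [1]) (fun y => y)).getD 0
      = max (pvGmax prev bs last) 1 := by
  induction bs generalizing prev with
  | nil => simp [pvPd, pvGmax, PySem.List.max?_id_cons]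
  | cons x r ih =>
    simp only [List.cons_append, pvPd, pvGmax]
    have hih := ih x
    cases hpd : pvPd x (r ++ [last]) with
    | nil =>
      rw [hpd] at hih
      simp only [List.nil_append, PySem.List.max?_id_cons, List.foldl_cons, List.foldl_nil,
        Option.getD_some] at hih ⊢
      omega
    | cons d0 dr =>
      rw [hpd] at hih
      simp only [List.cons_append, PySem.List.max?_id_cons, Option.getD_some] at hih ⊢
      rw [List.foldl_cons, pvFM (dr ++ [1]) (x - prev) d0, hih]
      omega

-- filter over an index range of t equals pvBrk
theorem pvL2 (t : List (Int × Int)) (a : Int) (ha : 0 ≤ a) :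
    (PySem.List.pyRange a (a + (t.length : Int)) 1).filter
        (fun i => !(dominoA (t.getD (i - a).toNat (0, 0)).1 (t.getD (i - a).toNat (0, 0)).2))
      = pvBrk t a := by
  induction t generalizing a with
  | nil => simp [pvBrk, PySem.List.pyRange_one_eq_nil]
  | cons p u ih =>
    have hcons : PySem.List.pyRange a (a + ((p :: u).length : Int)) 1
        = a :: PySem.List.pyRange (a + 1) (a + ((p :: u).length : Int)) 1 := by
      apply PySem.List.pyRange_one_cons
      simp [List.length_cons]
    rw [hcons]
    have htail : (PySem.List.pyRange (a + 1) (a + ((p :: u).length : Int)) 1).filter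
        (fun i => !(dominoA ((p :: u).getD (i - a).toNat (0, 0)).1 ((p :: u).getD (i - a).toNat (0, 0)).2))
        = pvBrk u (a + 1) := by
      have hbound : a + ((p :: u).length : Int) = (a + 1) + (u.length : Int) := by
        simp [List.length_cons]; omega
      rw [hbound]
      rw [List.filter_congr (q := fun i =>
        !(dominoA (u.getD (i - (a + 1)).toNat (0, 0)).1 (u.getD (i - (a + 1)).toNat (0, 0)).2))]
      · exact ih (a + 1) (by omega)
      · intro i hi
        have hmem := (PySem.List.mem_pyRange_one.1 hi).1
        have hnat : (i - a).toNat = (i - (a + 1)).toNat + 1 := by omega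
        rw [hnat, List.getD_cons_succ]
    simp only [List.filter_cons, htail]
    have hzero : (a - a).toNat = 0 := by omega
    simp only [hzero, List.getD_cons_zero]
    by_cases hd : dominoA p.1 p.2 <;> simp [pvBrk, hd]

theorem pvPairs_length (x : Int) (rest : List Int) :
    (pvPairs (x :: rest)).length = rest.length := by
  simp [pvPairs, List.length_zip]

-- reading the pair list at a valid index is reading v twice
theorem pvPair_get (x : Int) (rest : List Int) (i : Int) (h0 : 0 ≤ i)
    (hi : i < ((pvPairs (x :: rest)).length : Int)) :
    PySem.List.pyGetD (pvPairs (x :: rest)) i (0, 0)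
      = (PySem.List.pyGetD (x :: rest) i 0, PySem.List.pyGetD (x :: rest) (i + 1) 0) := by
  have hri : i < (rest.length : Int) := by rw [pvPairs_length] at hi; exact hi
  have hlen : ((x :: rest).length : Int) = (rest.length : Int) + 1 := by
    simp [List.length_cons]
  rw [PySem.List.pyGetD_eq_getElem _ _ h0 hi,
      PySem.List.pyGetD_eq_getElem _ _ h0 (by omega),
      PySem.List.pyGetD_eq_getElem _ _ (by omega) (by omega)]
  have h1 : (i + 1).toNat = i.toNat + 1 := by omega
  have hk : i.toNat < (List.zip (x :: rest) rest).length := by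
    have : (List.zip (x :: rest) rest).length = (pvPairs (x :: rest)).length := by
      simp [pvPairs]
    omega
  show (List.zip (x :: rest) rest)[i.toNat]'hk = _
  rw [List.getElem_zip]
  simp only [h1, List.getElem_cons_succ]

theorem pvA_eq (v : List Int) (hv : v ≠ []) :
    d_vect v = ((pvPairs v).foldl pvStep (1, 1)).2 := by
  obtain ⟨x, rest, rfl⟩ := List.exists_cons_of_ne_nil hv
  show ((PySem.List.pyRange 0 (((x :: rest).length : Int) - 1) 1).foldl (pvBodyA (x :: rest)) (1, 1)).2 = _
  have hlen : (((x :: rest).length : Int) - 1) = ((pvPairs (x :: rest)).length : Int) := by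
    rw [pvPairs_length]; simp [List.length_cons]
  rw [hlen]
  rw [PySem.List.foldl_congr_mem' _ (pvBodyA (x :: rest))
    (fun acc j => pvStep acc (PySem.List.pyGetD (pvPairs (x :: rest)) j (0, 0))) (1, 1)
    (by
      intro i hi acc
      obtain ⟨hi0, hi1⟩ := PySem.List.mem_pyRange_one.1 hi
      show pvBodyA (x :: rest) acc i = pvStep acc (PySem.List.pyGetD (pvPairs (x :: rest)) i (0, 0))
      rw [pvPair_get x rest i hi0 hi1]
      rfl)]
  rw [PySem.List.foldl_pyRange_zero_pyGetD' (pvPairs (x :: rest)) (0, 0) pvStep (1, 1)]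

theorem pvB_eq (v : List Int) (hv : v ≠ []) :
    d_vect_alt v
      = max (pvGmax (-1) (pvBrk (pvPairs v) 0) ((pvPairs v).length : Int)) 1 := by
  obtain ⟨x, rest, rfl⟩ := List.exists_cons_of_ne_nil hv
  have hlen : (((x :: rest).length : Int) - 1) = ((pvPairs (x :: rest)).length : Int) := by
    rw [pvPairs_length]; simp [List.length_cons]
  have hbreaks : (PySem.List.pyRange 0 (((x :: rest).length : Int) - 1) 1).filter
      (fun i => !(dominoA (PySem.List.pyGetD (x :: rest) i 0) (PySem.List.pyGetD (x :: rest) (i + 1) 0)))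
      = pvBrk (pvPairs (x :: rest)) 0 := by
    rw [hlen]
    rw [List.filter_congr (q := fun i =>
      !(dominoA ((pvPairs (x :: rest)).getD (i - 0).toNat (0, 0)).1
                ((pvPairs (x :: rest)).getD (i - 0).toNat (0, 0)).2))]
    · have := pvL2 (pvPairs (x :: rest)) 0 (by omega)
      simpa using this
    · intro i hi
      obtain ⟨hi0, hi1⟩ := PySem.List.mem_pyRange_one.1 hi
      have hgd : (pvPairs (x :: rest)).getD (i - 0).toNat (0, 0)
          = PySem.List.pyGetD (pvPairs (x :: rest)) i (0, 0) := by
        rw [PySem.List.pyGetD_eq_getElem _ _ hi0 hi1]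
        rw [List.getD_eq_getElem _ _ (by omega)]
        simp
      rw [hgd, pvPair_get x rest i hi0 hi1]
  simp only [d_vect_alt]
  rw [hbreaks]
  rw [PySem.List.slice_from_one]
  rw [show ([-1] ++ pvBrk (pvPairs (x :: rest)) 0 ++ [((x :: rest).length : Int) - 1])
      = (-1) :: (pvBrk (pvPairs (x :: rest)) 0 ++ [((x :: rest).length : Int) - 1]) by simp]
  rw [List.tail_cons, pvPd_zip, hlen, pvM5]

theorem pvNil : d_vect [] = d_vect_alt [] := by decide

-- ===== VERDICT (by name: the statement is the Claim_ definition above) =====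
theorem d_vect_spec : Claim_equal_d_vect := by
  intro v _
  unfold Spec_d_vect
  rcases eq_or_ne v [] with rfl | hv
  · exact pvNil
  · rw [pvA_eq v hv, pvB_eq v hv, pvMain (pvPairs v) 0 1 1 (by omega) (by omega)]
    have h1 : (0 : Int) - 1 = -1 := by omega
    have h2 : (0 : Int) + ((pvPairs v).length : Int) = ((pvPairs v).length : Int) := by omega
    rw [h1, h2]
    omega
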